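-- pv_equiv track=rewrite | github.com/Researcher-Feng/Cross2DL | data_process/code_utils/clean.py | clean_multiple_pun
-- ===== SOURCE A (Python) =====
-- def clean_multiple_pun(text_list):
--     new_list = []
--     previous_comma = False
--     for idx, item in enumerate(text_list):
--         if item in [',', ';', '.']:
--             if previous_comma:
--                 continue
--             else:
--                 if idx == len(text_list) - 1:
--                     new_list.append('.')
--                     continue
--                 new_list.append(',')
--                 previous_comma = True
--         else:
--             new_list.append(item)
--             previous_comma = False
--     return new_list
-- ===== SOURCE B (Python) =====
-- def clean_multiple_pun(text_list):
--     PUN = {',', ';', '.'}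
--     # 1) group the list into maximal runs of (is-punctuation, run)
--     groups = []
--     i = 0
--     n = len(text_list)
--     while i < n:
--         j = i
--         key = text_list[i] in PUN
--         while j < n and (text_list[j] in PUN) == key:
--             j += 1
--         groups.append((key, text_list[i:j]))
--         i = j
--     # 2) emit: non-punctuation runs verbatim; a punctuation run collapses to one
--     #    token, '.' only for a single trailing punctuation, ',' otherwise
--     out = []
--     for gi, (is_pun, run) in enumerate(groups):
--         if is_pun:
--             out.append('.' if gi == len(groups) - 1 and len(run) == 1 else ',')
--         else:
--             out.extend(run)
--     return out
-- ===== Notes on version B (the rewrite author's own statement) =====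
-- stated objective: alternative
-- what changed: Replaces the previous_comma flag walk with explicit run-grouping: the list is split into maximal punctuation/non-punctuation runs, then each punctuation run is collapsed to one token ('.' only for a single trailing punctuation).
import Mathlib
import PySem

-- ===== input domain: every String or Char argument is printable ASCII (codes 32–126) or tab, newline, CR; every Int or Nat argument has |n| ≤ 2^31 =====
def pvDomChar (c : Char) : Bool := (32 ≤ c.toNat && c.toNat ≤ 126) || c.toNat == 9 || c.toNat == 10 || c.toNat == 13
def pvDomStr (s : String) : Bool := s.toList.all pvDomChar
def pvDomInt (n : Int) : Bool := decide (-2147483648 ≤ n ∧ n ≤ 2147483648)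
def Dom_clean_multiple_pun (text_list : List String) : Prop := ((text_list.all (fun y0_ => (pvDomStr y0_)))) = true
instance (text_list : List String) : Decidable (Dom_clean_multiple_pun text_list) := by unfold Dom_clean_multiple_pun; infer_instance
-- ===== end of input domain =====

-- B collapses each run of punctuation tokens to one token via explicit run-grouping
-- instead of A's previous_comma flag; same O(n) cost, alternative decomposition.

-- ===== PORT A =====
-- the loop of A, as a structural recursion over the same state (idx, new_list, previous_comma);
-- n is len(text_list), fixed for the whole loop
def cleanA_go (n : Nat) : List String → Nat → List String → Bool → List String
  | [], _, new_list, _ => new_list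
  | item :: rest, idx, new_list, previous_comma =>
    if [",", ";", "."].contains item then
      if previous_comma then
        cleanA_go n rest (idx + 1) new_list previous_comma
      else if idx = n - 1 then
        cleanA_go n rest (idx + 1) (new_list ++ ["."]) previous_comma
      else
        cleanA_go n rest (idx + 1) (new_list ++ [","]) true
    else
      cleanA_go n rest (idx + 1) (new_list ++ [item]) false

def clean_multiple_pun (text_list : List String) : List String :=
  cleanA_go text_list.length text_list 0 [] false

-- ===== PORT B =====
def isPunB (s : String) : Bool := s == "," || s == ";" || s == "."

-- Source B's first while loop: split into maximal runs of equal punctuation-key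
def groupRuns : List String → List (Bool × List String)
  | [] => []
  | x :: xs =>
    let k := isPunB x
    (k, x :: xs.takeWhile (fun y => isPunB y == k)) ::
      groupRuns (xs.dropWhile (fun y => isPunB y == k))
termination_by l => l.length
decreasing_by
  simp only [List.length_cons]
  exact Nat.lt_succ_of_le (List.length_dropWhile_le _ _)

-- Source B's second loop over enumerate(groups); m is len(groups)
def cleanB_go (m : Nat) : List (Bool × List String) → Nat → List String → List String
  | [], _, out => out
  | (is_pun, run) :: rest, gi, out =>
    if is_pun then
      cleanB_go m rest (gi + 1) (out ++ [if gi = m - 1 ∧ run.length = 1 then "." else ","])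
    else
      cleanB_go m rest (gi + 1) (out ++ run)

def clean_multiple_pun_alt (text_list : List String) : List String :=
  let gs := groupRuns text_list
  cleanB_go gs.length gs 0 []

-- ===== PRECONDITION & SPEC =====
def Spec_clean_multiple_pun (text_list : List String) (out : List String) : Prop := out = clean_multiple_pun_alt text_list
instance (text_list : List String) (out : List String) : Decidable (Spec_clean_multiple_pun text_list out) := by unfold Spec_clean_multiple_pun; infer_instance

-- ===== CLAIM (what is proved, stated in full; the proofs are below) =====
def Claim_equal_clean_multiple_pun : Prop := ∀ (text_list : List String), Dom_clean_multiple_pun text_list → Spec_clean_multiple_pun text_list (clean_multiple_pun text_list)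

-- ===== LEMMAS AND PROOFS =====

-- common reference function: collapse the leading punctuation run, recurse
def pvRef : List String → List String
  | [] => []
  | x :: xs =>
    if isPunB x then
      if xs = [] then ["."]
      else "," :: pvRef (xs.dropWhile isPunB)
    else x :: pvRef xs
termination_by l => l.length
decreasing_by
  · simp only [List.length_cons]
    exact Nat.lt_succ_of_le (List.length_dropWhile_le _ _)
  · simp

theorem contains_eq_isPunB (s : String) : ([",", ";", "."] : List String).contains s = isPunB s := by
  simp only [List.contains, isPunB]
  by_cases h1 : s = "," <;> by_cases h2 : s = ";" <;> by_cases h3 : s = "." <;> simp [h1, h2, h3]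

theorem cleanA_go_eq (l : List String) : ∀ (idx : Nat) (acc : List String) (prev : Bool),
    cleanA_go (idx + l.length) l idx acc prev
      = acc ++ (if prev then pvRef (l.dropWhile isPunB) else pvRef l) := by
  induction l with
  | nil => intro idx acc prev; cases prev <;> simp [cleanA_go, pvRef]
  | cons x xs ih =>
    intro idx acc prev
    have hidx : idx + (x :: xs).length = (idx + 1) + xs.length := by
      simp only [List.length_cons]; omega
    rw [cleanA_go, contains_eq_isPunB]
    by_cases hx : isPunB x = true
    · rw [if_pos hx]
      cases prev with
      | true =>
        rw [if_pos rfl, hidx, ih]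
        simp [hx]
      | false =>
        rw [if_neg (by simp)]
        cases xs with
        | nil =>
          rw [if_pos (by simp), cleanA_go]
          simp [pvRef, hx]
        | cons y ys =>
          rw [if_neg (by intro h; simp only [List.length_cons] at h; omega), hidx, ih]
          have hrhs : pvRef (x :: y :: ys) = "," :: pvRef (List.dropWhile isPunB (y :: ys)) := by
            rw [pvRef, if_pos hx, if_neg (by simp)]
          simp [hrhs]
    · rw [if_neg hx, hidx, ih]
      have hdw : List.dropWhile isPunB (x :: xs) = x :: xs := by
        rw [List.dropWhile_cons, if_neg (by simp [hx])]
      cases prev with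
      | true =>
        rw [hdw, pvRef, if_neg hx]
        simp
      | false =>
        rw [pvRef, if_neg hx]
        simp

theorem cleanA_eq_ref (l : List String) : clean_multiple_pun l = pvRef l := by
  have := cleanA_go_eq l 0 [] false
  simpa [clean_multiple_pun] using this

-- interpretation of a group list (what cleanB_go appends)
def pvFlat : List (Bool × List String) → List String
  | [] => []
  | (k, g) :: rest =>
    (if k then [if rest = [] ∧ g.length = 1 then "." else ","] else g) ++ pvFlat rest

theorem cleanB_go_eq (gs : List (Bool × List String)) : ∀ (gi : Nat) (out : List String),
    cleanB_go (gi + gs.length) gs gi out = out ++ pvFlat gs := by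
  induction gs with
  | nil => intro gi out; simp [cleanB_go, pvFlat]
  | cons p rest ih =>
    obtain ⟨k, g⟩ := p
    intro gi out
    rw [cleanB_go]
    have hlen : gi + ((k, g) :: rest).length = (gi + 1) + rest.length := by simp; omega
    by_cases hk : k = true
    · subst hk
      rw [if_pos rfl, hlen, ih]
      by_cases hr : rest = []
      · subst hr
        simp only [pvFlat, List.length_nil, List.append_nil]
        by_cases hg : g.length = 1 <;> simp [hg]
      · have hne : ¬ (gi = gi + 1 + rest.length - 1) := by
          intro h
          have : rest.length = 0 := by omega
          exact hr (List.eq_nil_of_length_eq_zero this)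
        simp [pvFlat, hr]
    · simp only [Bool.not_eq_true] at hk
      subst hk
      rw [if_neg (by simp), hlen, ih]
      simp [pvFlat]

-- non-punctuation prefix passes through pvRef unchanged
theorem pvRef_nonpun_prefix (xs : List String) :
    pvRef xs = xs.takeWhile (fun y => isPunB y == false) ++ pvRef (xs.dropWhile (fun y => isPunB y == false)) := by
  induction xs with
  | nil => simp
  | cons y ys ih =>
    by_cases hy : isPunB y = true
    · simp [hy]
    · simp only [Bool.not_eq_true] at hy
      rw [pvRef, hy]
      simp [hy, ih]

theorem groupRuns_ne_nil (x : String) (xs : List String) : groupRuns (x :: xs) ≠ [] := by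
  rw [groupRuns]; simp

theorem flat_groupRuns_aux (n : Nat) : ∀ l : List String, l.length ≤ n → pvFlat (groupRuns l) = pvRef l := by
  induction n with
  | zero =>
    intro l hl
    have : l = [] := List.eq_nil_of_length_eq_zero (Nat.le_zero.mp hl)
    subst this; simp [groupRuns, pvFlat, pvRef]
  | succ n ih =>
    intro l hl
    cases l with
    | nil => simp [groupRuns, pvFlat, pvRef]
    | cons x xs =>
      rw [groupRuns]
      by_cases hx : isPunB x = true
      · simp only [hx]
        have hpred : (fun y => isPunB y == true) = isPunB := by
          funext y; simp
        rw [hpred]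
        have hdrop : (xs.dropWhile isPunB).length ≤ n := by
          have := List.length_dropWhile_le isPunB xs
          simp at hl; omega
        cases xs with
        | nil =>
          simp [pvFlat, groupRuns, pvRef, hx]
        | cons y ys =>
          rw [pvRef, if_pos hx, if_neg (by simp)]
          rw [pvFlat, ← ih _ hdrop]
          by_cases hy : isPunB y = true
          · -- a punctuation run of length ≥ 2 never becomes '.'
            have hne : ¬ (groupRuns ((y :: ys).dropWhile isPunB) = [] ∧
                ((x : String) :: (y :: ys).takeWhile isPunB).length = 1) := by
              rintro ⟨-, h2⟩
              rw [List.takeWhile_cons, if_pos hy] at h2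
              simp at h2
            rw [if_pos rfl, if_neg hne]
            simp
          · simp only [Bool.not_eq_true] at hy
            have hdw : (y :: ys).dropWhile isPunB = y :: ys := by
              rw [List.dropWhile_cons, if_neg (by simp [hy])]
            have hne : ¬ (groupRuns ((y :: ys).dropWhile isPunB) = [] ∧
                ((x : String) :: (y :: ys).takeWhile isPunB).length = 1) := by
              rintro ⟨h1, -⟩
              rw [hdw] at h1
              exact groupRuns_ne_nil y ys h1
            rw [if_pos rfl, if_neg hne]
            simp
      · simp only [Bool.not_eq_true] at hx
        simp only [hx]
        have hdrop : (xs.dropWhile (fun y => isPunB y == false)).length ≤ n := by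
          have := List.length_dropWhile_le (fun y => isPunB y == false) xs
          simp at hl; omega
        rw [pvFlat, if_neg (by simp), ih _ hdrop]
        rw [pvRef, hx]
        simp [pvRef_nonpun_prefix xs]

theorem cleanB_eq_ref (l : List String) : clean_multiple_pun_alt l = pvRef l := by
  have hgo := cleanB_go_eq (groupRuns l) 0 []
  simp only [Nat.zero_add, List.nil_append] at hgo
  rw [clean_multiple_pun_alt]
  simp only [hgo]
  exact flat_groupRuns_aux l.length l (le_refl _)

-- ===== VERDICT (by name: the statement is the Claim_ definition above) =====
theorem clean_multiple_pun_spec : Claim_equal_clean_multiple_pun := by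
  intro l _
  unfold Spec_clean_multiple_pun
  rw [cleanA_eq_ref, cleanB_eq_ref]
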